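-- pv_equiv track=rewrite | github.com/scooter-lacroix/LeIndex | src/leindex/search_utils.py | _convert_like_to_regex
-- ===== SOURCE A (Python) =====
-- def _convert_like_to_regex(pattern: str) -> str:
--     """Convert SQL LIKE patterns to regex with improved escaping."""
--     if not pattern:
--         return pattern
--
--     # Escape regex special characters except % and _
--     # We need to be careful about the order of escaping
--     escaped = pattern
--
--     # Escape backslash first (important for Windows paths)
--     escaped = escaped.replace('\\', '\\\\')
--
--     # Escape other special characters
--     special_chars = ['.', '^', '$', '(', ')', '[', ']', '{', '}', '|', '+', '?']
--     for char in special_chars: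
--         escaped = escaped.replace(char, f'\\{char}')
--
--     # Convert LIKE wildcards to regex
--     # % matches any sequence of characters (including none)
--     # _ matches exactly one character
--     regex_pattern = escaped.replace('%', '.*').replace('_', '.')
--
--     # Add anchors if the pattern doesn't have them and doesn't start/end with wildcards
--     if not regex_pattern.startswith('.*') and not regex_pattern.startswith('^'):
--         regex_pattern = '^' + regex_pattern
--     if not regex_pattern.endswith('.*') and not regex_pattern.endswith('$'):
--         regex_pattern = regex_pattern + '$'
--
--     return regex_pattern
-- ===== SOURCE B (Python) =====
-- _ESC = {'\\': '\\\\', '%': '.*', '_': '.'}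
-- for _c in '.^$()[]{}|+?':
--     _ESC[_c] = '\\' + _c
--
--
-- def _convert_like_to_regex(pattern: str) -> str:
--     """Convert SQL LIKE patterns to regex in a single pass."""
--     if not pattern:
--         return pattern
--
--     regex_pattern = ''.join(_ESC.get(c, c) for c in pattern)
--
--     if not regex_pattern.startswith('.*') and not regex_pattern.startswith('^'):
--         regex_pattern = '^' + regex_pattern
--     if not regex_pattern.endswith('.*') and not regex_pattern.endswith('$'):
--         regex_pattern = regex_pattern + '$'
--
--     return regex_pattern
-- ===== Notes on version B (the rewrite author's own statement) =====
-- stated objective: simpler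
-- what changed: Replaces A's 13 sequential str.replace passes (each rescanning the whole string) with a single per-character pass through a fixed translation table joined once.
import Mathlib
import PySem

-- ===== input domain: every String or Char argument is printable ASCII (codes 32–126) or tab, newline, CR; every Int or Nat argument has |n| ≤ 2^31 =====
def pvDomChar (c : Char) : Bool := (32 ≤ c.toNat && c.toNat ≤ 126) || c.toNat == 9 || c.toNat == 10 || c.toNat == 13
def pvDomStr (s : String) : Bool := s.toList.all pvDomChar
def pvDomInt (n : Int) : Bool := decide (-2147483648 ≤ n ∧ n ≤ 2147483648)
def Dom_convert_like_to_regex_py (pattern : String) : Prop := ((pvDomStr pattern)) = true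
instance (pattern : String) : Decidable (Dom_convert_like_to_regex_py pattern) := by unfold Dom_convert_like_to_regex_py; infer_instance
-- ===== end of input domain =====

-- B replaces A's 13 sequential str.replace scans by a single per-character pass (objective: simpler one-pass decomposition; no speed claim).

-- ===== PORT A =====
def specialCharsA : List Char := ['.', '^', '$', '(', ')', '[', ']', '{', '}', '|', '+', '?']

def convert_like_to_regex_py (pattern : String) : String :=
  if pattern = "" then pattern
  else
    -- escaped = pattern.replace('\\', '\\\\')
    let escaped := PySem.Str.replace pattern (String.ofList ['\\']) (String.ofList ['\\', '\\'])
    -- for char in special_chars: escaped = escaped.replace(char, '\\' + char)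
    let escaped := specialCharsA.foldl
      (fun e c => PySem.Str.replace e (String.ofList [c]) (String.ofList ['\\', c])) escaped
    -- regex_pattern = escaped.replace('%', '.*').replace('_', '.')
    let regex_pattern := PySem.Str.replace
      (PySem.Str.replace escaped (String.ofList ['%']) (String.ofList ['.', '*']))
      (String.ofList ['_']) (String.ofList ['.'])
    let regex_pattern :=
      if !(PySem.Str.startswith regex_pattern ".*") && !(PySem.Str.startswith regex_pattern "^")
      then String.ofList ('^' :: regex_pattern.toList) else regex_pattern
    let regex_pattern :=
      if !(PySem.Str.endswith regex_pattern ".*") && !(PySem.Str.endswith regex_pattern "$")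
      then String.ofList (regex_pattern.toList ++ ['$']) else regex_pattern
    regex_pattern

-- ===== PORT B =====
-- the per-character translation table (_ESC.get(c, c) in Source B)
def escChar (c : Char) : List Char :=
  if c = '\\' then ['\\', '\\']
  else if c ∈ ['.', '^', '$', '(', ')', '[', ']', '{', '}', '|', '+', '?'] then ['\\', c]
  else if c = '%' then ['.', '*']
  else if c = '_' then ['.']
  else [c]

def convert_like_to_regex_py_alt (pattern : String) : String :=
  if pattern = "" then pattern
  else
    -- regex_pattern = ''.join(_ESC.get(c, c) for c in pattern)
    let regex_pattern := String.ofList (pattern.toList.flatMap escChar)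
    let regex_pattern :=
      if !(PySem.Str.startswith regex_pattern ".*") && !(PySem.Str.startswith regex_pattern "^")
      then String.ofList ('^' :: regex_pattern.toList) else regex_pattern
    let regex_pattern :=
      if !(PySem.Str.endswith regex_pattern ".*") && !(PySem.Str.endswith regex_pattern "$")
      then String.ofList (regex_pattern.toList ++ ['$']) else regex_pattern
    regex_pattern

-- ===== PRECONDITION & SPEC =====
def Spec_convert_like_to_regex_py (pattern : String) (out : String) : Prop := out = convert_like_to_regex_py_alt pattern
instance (pattern : String) (out : String) : Decidable (Spec_convert_like_to_regex_py pattern out) := by unfold Spec_convert_like_to_regex_py; infer_instance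

-- ===== CLAIM (what is proved, stated in full; the proofs are below) =====
def Claim_equal_convert_like_to_regex_py : Prop := ∀ (pattern : String), Dom_convert_like_to_regex_py pattern → Spec_convert_like_to_regex_py pattern (convert_like_to_regex_py pattern)

-- ===== LEMMAS AND PROOFS =====

-- Python's s.replace(old, new) for a single-character old is the per-character map a ↦ (if a = old then new else a).
lemma replace_single_go (c : Char) (new : List Char) :
    ∀ (fuel : Nat) (l acc : List Char), l.length ≤ fuel →
      PySem.Chars.replace.go [c] new fuel l acc
        = acc.reverse ++ l.flatMap (fun a => if a = c then new else [a]) := by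
  intro fuel
  induction fuel with
  | zero =>
    intro l acc h
    have : l = [] := List.length_eq_zero_iff.mp (Nat.le_zero.mp h)
    subst this
    simp [PySem.Chars.replace.go]
  | succ n ih =>
    intro l acc h
    cases l with
    | nil => simp [PySem.Chars.replace.go]
    | cons a t =>
      have ht : t.length ≤ n := by simpa using Nat.le_of_succ_le_succ h
      by_cases hac : a = c
      · subst hac
        have hpre : List.isPrefixOf [a] (a :: t) = true := by
          simp [List.isPrefixOf]
        simp only [PySem.Chars.replace.go, hpre, if_pos]
        rw [ih _ _ (by simpa using ht)]
        simp
      · have hpre : List.isPrefixOf [c] (a :: t) = false := by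
          simp [List.isPrefixOf]; intro hh; exact absurd hh.symm hac
        simp only [PySem.Chars.replace.go, hpre]
        rw [ih _ _ ht]
        simp [hac]

lemma replace_single (c : Char) (new : List Char) (l : List Char) :
    PySem.Chars.replace l [c] new = l.flatMap (fun a => if a = c then new else [a]) := by
  simp [PySem.Chars.replace]
  exact replace_single_go c new l.length l [] (le_refl _)

-- A's 15 sequential single-character replaces compose to B's single per-character pass.
set_option maxHeartbeats 1000000 in
lemma coreL (l : List Char) :
    PySem.Chars.replace (PySem.Chars.replace
      (List.foldl (fun e c => PySem.Chars.replace e [c] ['\\', c])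
        (PySem.Chars.replace l ['\\'] ['\\', '\\'])
        specialCharsA)
      ['%'] ['.', '*']) ['_'] ['.'] = l.flatMap escChar := by
  simp only [specialCharsA, List.foldl_cons, List.foldl_nil, replace_single, List.flatMap_assoc]
  refine List.flatMap_congr ?_
  intro a _
  simp only [escChar]
  split_ifs with h1 h2 h3 h4 <;> simp_all <;>
    rcases h2 with h | h | h | h | h | h | h | h | h | h | h | h <;> simp_all

-- the same fact at String level, in the exact shape of port A's `regex_pattern`
lemma coreS (p : String) :
    PySem.Str.replace
      (PySem.Str.replace
        (specialCharsA.foldl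
          (fun e c => PySem.Str.replace e (String.ofList [c]) (String.ofList ['\\', c]))
          (PySem.Str.replace p (String.ofList ['\\']) (String.ofList ['\\', '\\'])))
        (String.ofList ['%']) (String.ofList ['.', '*']))
      (String.ofList ['_']) (String.ofList ['.'])
    = String.ofList (p.toList.flatMap escChar) := by
  simp only [specialCharsA, List.foldl_cons, List.foldl_nil, PySem.Str.replace,
    String.toList_ofList]
  rw [← coreL p.toList]
  simp [specialCharsA]

-- ===== VERDICT (by name: the statement is the Claim_ definition above) =====
theorem convert_like_to_regex_py_spec : Claim_equal_convert_like_to_regex_py := by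
  intro pattern _
  unfold Spec_convert_like_to_regex_py convert_like_to_regex_py convert_like_to_regex_py_alt
  by_cases h : pattern = ""
  · simp [h]
  · simp only [h, if_false]
    rw [coreS pattern]
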